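-- pv_equiv track=rewrite | github.com/wholemann/daily-coding-dojo | 20200312/python/ironstick_test.py | solution
-- ===== SOURCE A (Python) =====
-- def solution(arrangement):
--     sticks = 0
--     total = 0
--     for c in arrangement.replace('()', '*'):
--         if c == '(':
--             sticks += 1
--         if c == '*':
--             total += sticks
--         if c == ')':
--             sticks -= 1
--             total += 1
--     return total
-- ===== SOURCE B (Python) =====
-- def solution(arrangement):
--     # Pass 1: prefix depths (open-paren depth just before each position).
--     depths = []
--     d = 0
--     for c in arrangement:
--         depths.append(d)
--         d += 1 if c == '(' else -1 if c == ')' else 0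
--     # Pass 2: sum contributions, identifying lasers by look-behind.
--     total = 0
--     for c, d0, prev in zip(arrangement, depths, ' ' + arrangement):
--         if c == ')':
--             total += d0 - 1 if prev == '(' else 1
--         elif c == '*':
--             total += d0
--     return total
-- ===== Notes on version B (the rewrite author's own statement) =====
-- stated objective: alternative
-- what changed: B drops the substring-replacement (laser-marking) preprocessing and instead makes two passes over the original string: it first builds the list of open-paren depths before each position, then sums per-character contributions, identifying a laser by looking at the previous character.
import Mathlib
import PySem

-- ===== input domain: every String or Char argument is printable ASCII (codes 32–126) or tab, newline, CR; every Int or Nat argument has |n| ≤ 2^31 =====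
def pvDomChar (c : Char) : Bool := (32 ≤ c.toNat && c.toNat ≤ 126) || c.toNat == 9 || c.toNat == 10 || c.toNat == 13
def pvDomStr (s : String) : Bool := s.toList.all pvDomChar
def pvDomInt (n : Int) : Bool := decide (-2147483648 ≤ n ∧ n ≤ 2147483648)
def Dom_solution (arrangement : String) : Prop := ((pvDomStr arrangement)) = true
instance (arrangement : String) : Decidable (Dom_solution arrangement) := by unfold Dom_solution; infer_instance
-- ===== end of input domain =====

-- B replaces A's substring-replacement preprocessing by a two-pass scheme (prefix depths, then a
-- look-behind sum over the original string); objective: alternative decomposition, same cost.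

-- ===== PORT A =====
-- A's for-loop over arrangement.replace('()','*') with state (sticks, total).
def aLoop : List Char → Int → Int → Int
  | [], _, total => total
  | c :: t, sticks, total =>
      let sticks1 := if c = '(' then sticks + 1 else sticks
      let total1 := if c = '*' then total + sticks1 else total
      if c = ')' then aLoop t (sticks1 - 1) (total1 + 1) else aLoop t sticks1 total1

def solution (arrangement : String) : Int :=
  aLoop (PySem.Str.replace arrangement "()" "*").toList 0 0

-- ===== PORT B =====
-- pass 1 of Source B: the list of open-paren depths just before each position
def depthsList : List Char → Int → List Int
  | [], _ => []
  | c :: t, d => d :: depthsList t (d + (if c = '(' then 1 else if c = ')' then -1 else 0))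

-- pass 2 of Source B: fold over the zipped triples (c, depth-before, previous char)
def bLoop : List (Char × Int × Char) → Int → Int
  | [], total => total
  | (c, d0, prev) :: r, total =>
      bLoop r (if c = ')' then total + (if prev = '(' then d0 - 1 else 1)
               else if c = '*' then total + d0 else total)

def solution_alt (arrangement : String) : Int :=
  let l := arrangement.toList
  bLoop (l.zip ((depthsList l 0).zip (' ' :: l))) 0

-- ===== PRECONDITION & SPEC =====
def Spec_solution (arrangement : String) (out : Int) : Prop := out = solution_alt arrangement
instance (arrangement : String) (out : Int) : Decidable (Spec_solution arrangement out) := by unfold Spec_solution; infer_instance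

-- ===== CLAIM (what is proved, stated in full; the proofs are below) =====
def Claim_equal_solution : Prop := ∀ (arrangement : String), Dom_solution arrangement → Spec_solution arrangement (solution arrangement)

-- ===== LEMMAS AND PROOFS =====

-- common reference function: total cut count of the suffix, given current depth d and previous char p
def refCount : List Char → Int → Char → Int
  | [], _, _ => 0
  | c :: t, d, p =>
      if c = '(' then refCount t (d + 1) c
      else if c = ')' then (if p = '(' then d - 1 else 1) + refCount t (d - 1) c
      else if c = '*' then d + refCount t d c
      else refCount t d c

-- the effect of Python's replace('()','*') as a recursion
def replaceList : List Char → List Char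
  | [] => []
  | [c] => [c]
  | c :: c2 :: t =>
      if c = '(' ∧ c2 = ')' then '*' :: replaceList t
      else c :: replaceList (c2 :: t)

theorem replace_go_eq (fuel : Nat) (l acc : List Char) (h : l.length ≤ fuel) :
    PySem.Chars.replace.go ['(', ')'] ['*'] fuel l acc = acc.reverse ++ replaceList l := by
  induction fuel generalizing l acc with
  | zero =>
      have : l = [] := by cases l <;> simp_all
      subst this
      simp [PySem.Chars.replace.go, replaceList]
  | succ n ih =>
      match l with
      | [] => simp [PySem.Chars.replace.go, replaceList]
      | c :: t =>
        rw [PySem.Chars.replace.go]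
        by_cases hp : List.isPrefixOf ['(', ')'] (c :: t) = true
        · cases t with
          | nil => simp [List.isPrefixOf] at hp
          | cons c2 t2 =>
            have hc : c = '(' ∧ c2 = ')' := by
              simp [List.isPrefixOf] at hp
              exact ⟨hp.1.symm, hp.2.symm⟩
            obtain ⟨rfl, rfl⟩ := hc
            rw [if_pos hp]
            have hd : List.drop (['(', ')'] : List Char).length ('(' :: ')' :: t2) = t2 := rfl
            have ha : (['*'] : List Char).reverse ++ acc = '*' :: acc := rfl
            rw [hd, ha, ih t2 ('*' :: acc) (by simp at h ⊢; omega)]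
            rw [show replaceList ('(' :: ')' :: t2) = '*' :: replaceList t2 from by
              rw [replaceList]; simp]
            simp
        · rw [if_neg hp]
          rw [ih t (c :: acc) (by simp at h; omega)]
          have hrl : replaceList (c :: t) = c :: replaceList t := by
            cases t with
            | nil => rfl
            | cons c2 t2 =>
                rw [replaceList, if_neg]
                intro hcc
                exact hp (by simp [List.isPrefixOf, hcc.1, hcc.2])
          rw [hrl]; simp

theorem replace_eq (s : String) :
    (PySem.Str.replace s "()" "*").toList = replaceList s.toList := by
  have h1 : ("()" : String).toList = ['(', ')'] := by decide
  have h2 : ("*" : String).toList = ['*'] := by decide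
  simp [PySem.Str.replace, PySem.Chars.replace, h1, h2]
  simpa using replace_go_eq s.toList.length s.toList [] le_rfl

theorem aLoop_eq (l : List Char) (d total : Int) (p : Char)
    (hp : ¬ (p = '(' ∧ l.head? = some ')')) :
    aLoop (replaceList l) d total = total + refCount l d p := by
  induction l using replaceList.induct generalizing d total p with
  | case1 => simp [replaceList, aLoop, refCount]
  | case2 c =>
      rw [replaceList]
      by_cases hc : c = '(' <;> by_cases hc2 : c = ')' <;> by_cases hc3 : c = '*' <;>
        simp_all [aLoop, refCount]
  | case3 c c2 t hpair ih1 =>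
      obtain ⟨rfl, rfl⟩ := hpair
      · rw [replaceList, if_pos ⟨rfl, rfl⟩]
        simp only [aLoop]
        have h1 : ¬ ('*' : Char) = '(' := by decide
        have h2 : ¬ ('*' : Char) = ')' := by decide
        simp only [h1, h2, if_false, if_true]
        rw [ih1 d (total + d) ')' (by simp)]
        simp [refCount]
        ring
  | case4 c c2 t hpair ih2 =>
      · rw [replaceList, if_neg hpair]
        have hrec : ∀ d' total', aLoop (replaceList (c2 :: t)) d' total' =
            total' + refCount (c2 :: t) d' c := by
          intro d' total'
          exact ih2 d' total' c (by
            intro hcc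
            exact hpair ⟨hcc.1, by simpa using hcc.2⟩)
        by_cases hc : c = '('
        · subst hc
          simp only [aLoop]
          have h1 : ¬ ('(' : Char) = ')' := by decide
          have h2 : ¬ ('(' : Char) = '*' := by decide
          simp only [h1, h2, if_false, if_true]
          rw [hrec]
          simp [refCount]
        · by_cases hc2 : c = ')'
          · subst hc2
            have hpne : p ≠ '(' := fun hq => hp ⟨hq, rfl⟩
            simp only [aLoop]
            have h1 : ¬ (')' : Char) = '(' := by decide
            have h2 : ¬ (')' : Char) = '*' := by decide
            simp only [h1, h2, if_false, if_true]
            rw [hrec]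
            simp [refCount, h1, hpne]
            ring
          · by_cases hc3 : c = '*'
            · subst hc3
              simp only [aLoop]
              have h1 : ¬ ('*' : Char) = '(' := by decide
              have h2 : ¬ ('*' : Char) = ')' := by decide
              simp only [h1, h2, if_false, if_true]
              rw [hrec]
              simp [refCount, h1, h2]
              ring
            · simp only [aLoop]
              simp only [hc, hc2, hc3, if_false]
              rw [hrec]
              simp [refCount, hc, hc2, hc3]

theorem bLoop_eq (l : List Char) (d total : Int) (p : Char) :
    bLoop (l.zip ((depthsList l d).zip (p :: l))) total = total + refCount l d p := by
  induction l generalizing d total p with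
  | nil => simp [depthsList, bLoop, refCount]
  | cons c t ih =>
      rw [depthsList]
      simp only [List.zip_cons_cons, bLoop]
      rw [ih]
      by_cases hc : c = '(' <;> by_cases hc2 : c = ')' <;> by_cases hc3 : c = '*' <;>
        simp_all [refCount, sub_eq_add_neg] <;> (try split_ifs) <;> omega

-- ===== VERDICT (by name: the statement is the Claim_ definition above) =====
theorem solution_spec : Claim_equal_solution := by
  intro s _
  unfold Spec_solution solution solution_alt
  rw [replace_eq, aLoop_eq s.toList 0 0 ' ' (by simp), bLoop_eq]
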